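-- pv_equiv track=rewrite | github.com/ccgarvey/rainwave-election-prediction | collect_data.py | checkTied
-- ===== SOURCE A (Python) =====
-- def checkTied(election):
--     '''
--     Determines if an election was a tie.
--
--     param: election, the election to check (in standard rainwave format)
--     return: True iff. the election was tied, regardless of requests
--     return: number of songs tied
--     '''
--     songs = election['songs']
--
--     # Single-song elections can't tie.
--     if len(songs) <= 1:
--         return false
--
--     # Election is only tied if the top two songs have the same number of votes.
--     n_tied = 1
--     for i in range(0, len(songs)-1):
--         if songs[i]['entry_votes'] == songs[i+1]['entry_votes']:
--             n_tied += 1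
--         else:
--             break
--
--     return (n_tied > 1), n_tied
-- ===== SOURCE B (Python) =====
-- def checkTied(election):
--     '''
--     Determines if an election was a tie.
--
--     The number of tied top songs is the length of the leading run of songs
--     sharing the leader's vote count, computed by structural recursion on the
--     song list instead of an index loop with a break.
--     '''
--     n_tied = _tied_run(election['songs'])
--     return n_tied > 1, n_tied
--
--
-- def _tied_run(songs):
--     '''Length of the leading run of songs with equal vote counts (recursive).'''
--     if len(songs) >= 2 and songs[0]['entry_votes'] == songs[1]['entry_votes']:
--         return 1 + _tied_run(songs[1:])
--     return 1
-- ===== Notes on version B (the rewrite author's own statement) =====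
-- stated objective: simpler
-- what changed: B replaces A's index loop with a break and a running counter by a recursive helper that computes the leading tied run directly by structural recursion on the song list (no guard, no indices, no mutable state).
import Mathlib
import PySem

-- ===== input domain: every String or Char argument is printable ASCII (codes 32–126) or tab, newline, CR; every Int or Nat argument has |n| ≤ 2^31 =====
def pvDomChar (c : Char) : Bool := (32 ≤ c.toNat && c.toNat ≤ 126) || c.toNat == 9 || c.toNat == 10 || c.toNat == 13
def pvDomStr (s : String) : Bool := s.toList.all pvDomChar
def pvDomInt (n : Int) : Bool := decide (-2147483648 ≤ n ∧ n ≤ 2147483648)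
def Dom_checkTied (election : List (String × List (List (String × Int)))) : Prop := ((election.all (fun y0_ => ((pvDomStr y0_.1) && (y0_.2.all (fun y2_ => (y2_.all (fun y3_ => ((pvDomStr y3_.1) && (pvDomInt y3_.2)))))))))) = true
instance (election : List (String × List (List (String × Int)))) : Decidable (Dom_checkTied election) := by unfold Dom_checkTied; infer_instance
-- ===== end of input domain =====

-- B computes the leading tied run by structural recursion on the song list instead of A's
-- index loop with a break and a running counter (objective: simpler).
-- ===== PORT A =====
-- songs[i]['entry_votes']: i is the loop counter, always in range; the KeyError case of the
-- lookup (none) is defaulted to 0 — inputs whose scanned prefix reaches a missing key are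
-- excluded by Pre_.
def pvVoteA (s : List (String × Int)) : Int := ((PySem.Dict.mk s).get? "entry_votes").getD 0

-- the `for i in range(0, len(songs)-1)` loop with its break, state n_tied
def pvLoopA (songs : List (List (String × Int))) (i : Nat) (n : Int) : Int :=
  if i + 1 < songs.length then
    if pvVoteA (songs.getD i []) = pvVoteA (songs.getD (i+1) []) then pvLoopA songs (i+1) (n+1)
    else n
  else n
termination_by songs.length - i

def checkTied (election : List (String × List (List (String × Int)))) : Bool × Int :=
  match (PySem.Dict.mk election).get? "songs" with
  | none => (false, 0)          -- Python raises KeyError here; excluded by Pre_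
  | some songs =>
    if songs.length ≤ 1 then (false, 0)   -- Python raises NameError (`false`) here; excluded by Pre_
    else
      let n_tied := pvLoopA songs 0 1
      (decide (1 < n_tied), n_tied)

-- ===== PORT B =====
def pvVoteB (s : List (String × Int)) : Int := ((PySem.Dict.mk s).get? "entry_votes").getD 0

-- _tied_run: structural recursion on the song list
def pvTiedRun : List (List (String × Int)) → Int
  | s0 :: s1 :: rest => if pvVoteB s0 = pvVoteB s1 then 1 + pvTiedRun (s1 :: rest) else 1
  | _ => 1

def checkTied_alt (election : List (String × List (List (String × Int)))) : Bool × Int :=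
  match (PySem.Dict.mk election).get? "songs" with
  | none => (false, 0)          -- Python raises KeyError here; excluded by Pre_
  | some songs =>
    let n_tied := pvTiedRun songs
    (decide (1 < n_tied), n_tied)

-- ===== PRECONDITION & SPEC =====
-- Pre_ excludes inputs where Python A raises (no 'songs' key → KeyError; ≤ 1 songs → NameError on
-- the undefined `false`) and, slightly wider than A's crash set, all elections where some song
-- lacks the 'entry_votes' key: on those, whether both programs raise KeyError or both return
-- depends on whether the tied prefix reaches the missing key, a position-dependent crash corner
-- with no closed form (A and B access the same keys, so they agree wherever both return).
def Pre_checkTied (election : List (String × List (List (String × Int)))) : Prop :=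
  2 ≤ (((PySem.Dict.mk election).get? "songs").getD []).length ∧
  ∀ s ∈ ((PySem.Dict.mk election).get? "songs").getD [],
    ((PySem.Dict.mk s).get? "entry_votes").isSome = true
instance (election : List (String × List (List (String × Int)))) : Decidable (Pre_checkTied election) := by unfold Pre_checkTied; infer_instance

def pvWitness_checkTied : (List (String × List (List (String × Int)))) :=
  [("songs", [[("entry_votes", 3)], [("entry_votes", 3)], [("entry_votes", 1)]])]

def Spec_checkTied (election : List (String × List (List (String × Int)))) (out : Bool × Int) : Prop := out = checkTied_alt election
instance (election : List (String × List (List (String × Int)))) (out : Bool × Int) : Decidable (Spec_checkTied election out) := by unfold Spec_checkTied; infer_instance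

-- ===== CLAIM (what is proved, stated in full; the proofs are below) =====
def Claim_equal_checkTied : Prop := ∀ (election : List (String × List (List (String × Int)))), Dom_checkTied election → Pre_checkTied election → Spec_checkTied election (checkTied election)

-- ===== LEMMAS AND PROOFS =====

theorem pvLoopA_eq_run (songs : List (List (String × Int))) (i : Nat) (n : Int) :
    pvLoopA songs i n = n - 1 + pvTiedRun (songs.drop i) := by
  by_cases h : i + 1 < songs.length
  · have hi : i < songs.length := by omega
    have hd : songs.drop i = songs.getD i [] :: songs.drop (i + 1) := by
      have := List.drop_eq_getElem_cons (l := songs) (i := i) hi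
      simpa [List.getD_eq_getElem?_getD, List.getElem?_eq_getElem hi] using this
    have hd2 : songs.drop (i + 1) = songs.getD (i+1) [] :: songs.drop (i + 2) := by
      have := List.drop_eq_getElem_cons (l := songs) (i := i + 1) h
      simpa [List.getD_eq_getElem?_getD, List.getElem?_eq_getElem h] using this
    rw [pvLoopA, if_pos h]
    by_cases he : pvVoteA (songs.getD i []) = pvVoteA (songs.getD (i+1) [])
    · have ih := pvLoopA_eq_run songs (i + 1) (n + 1)
      rw [if_pos he, ih, hd, hd2, pvTiedRun]
      have hAB : pvVoteA = pvVoteB := rfl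
      rw [← hAB, if_pos he, ← hd2]
      ring
    · rw [if_neg he, hd, hd2, pvTiedRun]
      have hAB : pvVoteA = pvVoteB := rfl
      rw [← hAB, if_neg he]
      ring
  · rw [pvLoopA, if_neg h]
    rcases hl : songs.drop i with _ | ⟨a, _ | ⟨b, r⟩⟩
    · simp [pvTiedRun]
    · simp [pvTiedRun]
    · exfalso
      have : (songs.drop i).length ≤ 1 := by
        simp [List.length_drop]; omega
      rw [hl] at this
      simp at this
termination_by songs.length - i

-- ===== VERDICT (by name: the statement is the Claim_ definition above) =====
theorem checkTied_spec : Claim_equal_checkTied := by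
  intro election _ hpre
  unfold Spec_checkTied checkTied checkTied_alt
  obtain ⟨hlen, _⟩ := hpre
  cases hg : (PySem.Dict.mk election).get? "songs" with
  | none => simp [hg] at hlen
  | some songs =>
    rw [hg] at hlen
    simp only [Option.getD_some] at hlen
    have hnle : ¬ songs.length ≤ 1 := by omega
    simp only [hnle, if_false]
    rw [pvLoopA_eq_run songs 0 1, List.drop_zero]
    norm_num
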